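-- pv_equiv track=rewrite | github.com/AlxndrJhn/adventofcode2024 | 22/day.py | fwd_secret
-- ===== SOURCE A (Python) =====
-- def mix(a, b):
--     return a ^ b
--
-- def prune(a):
--     return a % 16777216
--
-- def fwd_secret(secret, count):
--     for _ in range(count):
--         secret = mix(secret, (secret * 64))
--         secret = prune(secret)
--         secret = mix(secret, (secret // 32))
--         secret = prune(secret)
--         secret = mix(secret, (secret * 2048))
--         secret = prune(secret)
--     return secret
-- ===== SOURCE B (Python) =====
-- _N = 16777216
--
--
-- def _step(x):
--     x = (x ^ (x * 64)) % _N
--     x = (x ^ (x // 32)) % _N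
--     x = (x ^ (x * 2048)) % _N
--     return x
--
--
-- def _apply(cols, x):
--     y = 0
--     for c in cols:
--         if x & 1:
--             y ^= c
--         x >>= 1
--     return y
--
--
-- def _matmul(a, b):
--     return [_apply(a, c) for c in b]
--
--
-- def fwd_secret(secret, count):
--     if count <= 0:
--         return secret
--     # one generator step normalizes any int into [0, 2**24); the rest is
--     # GF(2) matrix exponentiation of the linear step map (columns as bitmasks)
--     s = _step(secret)
--     m = [_step(1 << i) for i in range(24)]
--     n = count - 1
--     while n:
--         if n & 1:
--             s = _apply(m, s)
--         m = _matmul(m, m)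
--         n >>= 1
--     return s
-- ===== Notes on version B (the rewrite author's own statement) =====
-- stated objective: faster
-- what changed: B replaces A's count-step iteration of the xorshift generator by GF(2) 24x24 bit-matrix exponentiation (columns stored as 24-bit masks), doing one normalizing generator step and then O(log count) matrix squarings/applications instead of count generator steps.
import Mathlib
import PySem

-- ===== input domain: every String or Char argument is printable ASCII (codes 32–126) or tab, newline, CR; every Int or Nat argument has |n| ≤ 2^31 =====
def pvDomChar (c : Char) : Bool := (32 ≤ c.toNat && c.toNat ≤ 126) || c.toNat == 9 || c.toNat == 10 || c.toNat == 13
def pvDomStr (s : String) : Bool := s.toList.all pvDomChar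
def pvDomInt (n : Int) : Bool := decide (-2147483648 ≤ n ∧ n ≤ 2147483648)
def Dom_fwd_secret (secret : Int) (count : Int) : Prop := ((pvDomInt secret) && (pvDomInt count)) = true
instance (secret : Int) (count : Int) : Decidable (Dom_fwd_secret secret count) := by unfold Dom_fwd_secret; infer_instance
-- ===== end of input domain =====

-- B replaces A's count-step iteration of the xorshift generator by GF(2) 24-bit
-- matrix exponentiation (columns as bitmasks): O(log count) applications instead of O(count).

-- ===== PORT A =====
def pvMix (a b : Int) : Int := PySem.Int.bxor a b

def pvPrune (a : Int) : Int := PySem.Int.mod a 16777216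

-- one pass of A's loop body: the three mix/prune rounds, in order
def pvBodyA (secret : Int) : Int :=
  let s1 := pvPrune (pvMix secret (secret * 64))
  let s2 := pvPrune (pvMix s1 (PySem.Int.floordiv s1 32))
  pvPrune (pvMix s2 (s2 * 2048))

def fwd_secret (secret : Int) (count : Int) : Int :=
  (PySem.List.pyRange 0 count 1).foldl (fun s _ => pvBodyA s) secret

-- ===== PORT B =====
-- Source B _step
def pvStepB (x : Int) : Int :=
  let a := PySem.Int.mod (PySem.Int.bxor x (x * 64)) 16777216
  let b := PySem.Int.mod (PySem.Int.bxor a (PySem.Int.floordiv a 32)) 16777216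
  PySem.Int.mod (PySem.Int.bxor b (b * 2048)) 16777216

-- Source B _apply: y accumulator, x shifted right each iteration (x & 1 is 0 or 1 in Python)
def pvApply (cols : List Int) (x : Int) : Int :=
  (cols.foldl
    (fun (st : Int × Int) c =>
      (if PySem.Int.band st.2 1 = 1 then PySem.Int.bxor st.1 c else st.1, st.2 >>> (1 : Nat)))
    ((0 : Int), x)).1

-- Source B _matmul
def pvMatmul (a b : List Int) : List Int := b.map (fun c => pvApply a c)

-- Source B: m = [_step(1 << i) for i in range(24)]  (i ≥ 0, so i.toNat is exact)
def pvCols : List Int :=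
  (PySem.List.pyRange 0 24 1).map (fun i => pvStepB ((1 : Int) <<< i.toNat))

-- Source B while-loop on n = count-1 ≥ 0 (Nat counter; Python's n is a nonnegative int here)
def pvLoop (m : List Int) (s : Int) (n : Nat) : Int :=
  if h : n = 0 then s
  else pvLoop (pvMatmul m m) (if n % 2 = 1 then pvApply m s else s) (n / 2)
termination_by n
decreasing_by omega

def fwd_secret_alt (secret : Int) (count : Int) : Int :=
  if count ≤ 0 then secret
  else pvLoop pvCols (pvStepB secret) (count - 1).toNat

-- ===== PRECONDITION & SPEC =====
def Spec_fwd_secret (secret : Int) (count : Int) (out : Int) : Prop := out = fwd_secret_alt secret count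
instance (secret : Int) (count : Int) (out : Int) : Decidable (Spec_fwd_secret secret count out) := by unfold Spec_fwd_secret; infer_instance

-- ===== CLAIM (what is proved, stated in full; the proofs are below) =====
def Claim_equal_fwd_secret : Prop := ∀ (secret : Int) (count : Int), Dom_fwd_secret secret count → Spec_fwd_secret secret count (fwd_secret secret count)

-- ===== LEMMAS AND PROOFS =====

-- Nat models of the two programs (proof-side only)
def nr1 (x : Nat) : Nat := (x ^^^ x * 64) % 16777216
def nr2 (x : Nat) : Nat := (x ^^^ x / 32) % 16777216
def nr3 (x : Nat) : Nat := (x ^^^ x * 2048) % 16777216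
def nstep (x : Nat) : Nat := nr3 (nr2 (nr1 x))

def napply : List Nat → Nat → Nat
  | [], _ => 0
  | c :: cs, x => (if x % 2 = 1 then c else 0) ^^^ napply cs (x / 2)

def npow2 : Nat → Nat → List Nat
  | 0, _ => []
  | n + 1, p => p :: npow2 n (2 * p)

def nloop (cols : List Nat) (s : Nat) (n : Nat) : Nat :=
  if h : n = 0 then s
  else nloop (cols.map (napply cols)) (if n % 2 = 1 then napply cols s else s) (n / 2)
termination_by n
decreasing_by omega

-- ---- xor helpers ----
theorem pvXor4 (p q r s : Nat) : (p ^^^ q) ^^^ (r ^^^ s) = (p ^^^ r) ^^^ (q ^^^ s) := by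
  apply Nat.eq_of_testBit_eq; intro i
  simp only [Nat.testBit_xor]
  cases hp : p.testBit i <;> cases hq : q.testBit i <;> cases hr : r.testBit i <;>
    cases hs : s.testBit i <;> rfl

theorem pvXorCancel (c x y : Nat) : (c ^^^ x) ^^^ (c ^^^ y) = x ^^^ y := by
  rw [pvXor4, Nat.xor_self, Nat.zero_xor]

theorem pvXorLeftComm (a b c : Nat) : a ^^^ (b ^^^ c) = b ^^^ (a ^^^ c) := by
  rw [← Nat.xor_assoc, Nat.xor_comm a b, Nat.xor_assoc]

theorem pvXorMod2 (a b : Nat) : (a ^^^ b) % 2 = a % 2 ^^^ b % 2 := by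
  rw [← Nat.and_one_is_mod, ← Nat.and_one_is_mod, ← Nat.and_one_is_mod,
    Nat.and_xor_distrib_right]

theorem pvXorDiv2 (a b : Nat) : (a ^^^ b) / 2 = a / 2 ^^^ b / 2 := Nat.xor_div_two

theorem pvXorMod24 (a b : Nat) : (a ^^^ b) % 16777216 = a % 16777216 ^^^ b % 16777216 := by
  have h : (16777216 : Nat) = 2 ^ 24 := by norm_num
  rw [h]
  exact Nat.xor_mod_two_pow

theorem pvXorMul64 (a b : Nat) : (a ^^^ b) * 64 = a * 64 ^^^ b * 64 := by
  have h : ∀ x : Nat, x * 64 = x <<< 6 := fun x => by simp [Nat.shiftLeft_eq]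
  rw [h, h, h, Nat.shiftLeft_xor_distrib]

theorem pvXorMul2048 (a b : Nat) : (a ^^^ b) * 2048 = a * 2048 ^^^ b * 2048 := by
  have h : ∀ x : Nat, x * 2048 = x <<< 11 := fun x => by simp [Nat.shiftLeft_eq]
  rw [h, h, h, Nat.shiftLeft_xor_distrib]

theorem pvXorDiv32 (a b : Nat) : (a ^^^ b) / 32 = a / 32 ^^^ b / 32 := by
  have h : ∀ x : Nat, x / 32 = x >>> 5 := fun x => by simp [Nat.shiftRight_eq_div_pow]
  rw [h, h, h, Nat.shiftRight_xor_distrib]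

-- ---- nstep is linear over xor ----
theorem nr1_xor (a b : Nat) : nr1 (a ^^^ b) = nr1 a ^^^ nr1 b := by
  unfold nr1; rw [pvXorMul64, pvXor4, pvXorMod24]

theorem nr2_xor (a b : Nat) : nr2 (a ^^^ b) = nr2 a ^^^ nr2 b := by
  unfold nr2; rw [pvXorDiv32, pvXor4, pvXorMod24]

theorem nr3_xor (a b : Nat) : nr3 (a ^^^ b) = nr3 a ^^^ nr3 b := by
  unfold nr3; rw [pvXorMul2048, pvXor4, pvXorMod24]

theorem nstep_xor (a b : Nat) : nstep (a ^^^ b) = nstep a ^^^ nstep b := by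
  unfold nstep; rw [nr1_xor, nr2_xor, nr3_xor]

theorem nstep_zero : nstep 0 = 0 := by decide

theorem nstep_lt (x : Nat) : nstep x < 16777216 := by
  unfold nstep nr3
  exact Nat.mod_lt _ (by norm_num)

-- ---- napply ----
theorem napply_zero (cs : List Nat) : napply cs 0 = 0 := by
  induction cs with
  | nil => rfl
  | cons c cs ih => simp [napply, ih]

theorem napply_xor (cs : List Nat) : ∀ a b, napply cs (a ^^^ b) = napply cs a ^^^ napply cs b := by
  induction cs with
  | nil => intro a b; simp [napply]
  | cons c cs ih =>
    intro a b
    simp only [napply, pvXorMod2, pvXorDiv2, ih]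
    rcases Nat.mod_two_eq_zero_or_one a with ha | ha <;>
      rcases Nat.mod_two_eq_zero_or_one b with hb | hb
    · simp [ha, hb]
    · simp [ha, hb, pvXorLeftComm]
    · simp [ha, hb, Nat.xor_assoc]
    · simp [ha, hb, pvXorCancel]

theorem napply_map (f : Nat → Nat) (hf0 : f 0 = 0)
    (hfx : ∀ a b, f (a ^^^ b) = f a ^^^ f b) :
    ∀ (cs : List Nat) (x : Nat), napply (cs.map f) x = f (napply cs x) := by
  intro cs
  induction cs with
  | nil => intro x; simp [napply, hf0]
  | cons c cs ih =>
    intro x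
    simp only [List.map_cons, napply, ih, hfx]
    by_cases h : x % 2 = 1 <;> simp [h, hf0]

-- xor of bit-disjoint values is addition
theorem pvXorDisj : ∀ (k a b : Nat), a < 2 ^ k → a ^^^ 2 ^ k * b = a + 2 ^ k * b := by
  intro k
  induction k with
  | zero =>
    intro a b ha
    have h0 : a = 0 := by omega
    subst h0; simp
  | succ k ih =>
    intro a b ha
    set t := 2 ^ k * b with ht
    have hpb : 2 ^ (k + 1) * b = 2 * t := by rw [ht]; ring
    have hmod : (a ^^^ 2 ^ (k + 1) * b) % 2 = a % 2 := by
      rw [pvXorMod2, hpb, Nat.mul_mod_right]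
      simp
    have hdiv : (a ^^^ 2 ^ (k + 1) * b) / 2 = a / 2 + t := by
      rw [pvXorDiv2, hpb, Nat.mul_div_cancel_left t (by norm_num)]
      have h2k : a / 2 < 2 ^ k := by
        have : (2:Nat) ^ (k+1) = 2 * 2 ^ k := by ring
        omega
      rw [ht]
      exact ih (a / 2) b h2k
    have hsum := Nat.div_add_mod (a ^^^ 2 ^ (k + 1) * b) 2
    have ha2 := Nat.div_add_mod a 2
    rw [hpb] at hsum ⊢
    rw [hpb] at hmod hdiv
    omega

theorem npow2_spec : ∀ (n k x : Nat), napply (npow2 n (2 ^ k)) x = 2 ^ k * (x % 2 ^ n) := by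
  intro n
  induction n with
  | zero => intro k x; simp [npow2, napply, Nat.mod_one]
  | succ n ih =>
    intro k x
    have h2 : (2 : Nat) * 2 ^ k = 2 ^ (k + 1) := by ring
    simp only [npow2, napply, h2, ih]
    have hd : (if x % 2 = 1 then 2 ^ k else 0) < 2 ^ (k + 1) := by
      have hkk : (2:Nat) ^ k < 2 ^ (k+1) := by
        have : (2:Nat) ^ (k+1) = 2 * 2 ^ k := by ring
        have : (0:Nat) < 2 ^ k := by positivity
        omega
      split
      · exact hkk
      · positivity
    rw [pvXorDisj (k + 1) _ _ hd]
    have hm : 0 < 2 ^ n := by positivity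
    have hx : x % 2 ^ (n + 1) = x % 2 + 2 * (x / 2 % 2 ^ n) := by
      have h1 : (2:Nat) ^ (n + 1) = 2 * 2 ^ n := by ring
      rw [h1]
      conv_lhs => rw [show x = 2 * (x / 2) + x % 2 by omega]
      rw [Nat.add_mod, Nat.mul_mod_mul_left]
      have h2' : x % 2 % (2 * 2 ^ n) = x % 2 := Nat.mod_eq_of_lt (by omega)
      rw [h2']
      have h3 : 2 * (x / 2 % 2 ^ n) + x % 2 < 2 * 2 ^ n := by
        have := Nat.mod_lt (x / 2) hm
        omega
      rw [Nat.mod_eq_of_lt h3]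
      omega
    rw [hx]
    rcases Nat.mod_two_eq_zero_or_one x with h | h <;> rw [h] <;> simp <;>
      rw [pow_succ] <;> ring

-- the step matrix represents nstep on [0, 2^24)
theorem pvColsRepr (x : Nat) :
    napply ((npow2 24 1).map nstep) x = nstep (x % 16777216) := by
  rw [napply_map nstep nstep_zero nstep_xor]
  have h : napply (npow2 24 1) x = x % 16777216 := by
    rw [show (1 : Nat) = 2 ^ 0 from rfl, npow2_spec 24 0 x]
    norm_num
  rw [h]

theorem pvIterTwo (g : Nat → Nat) : g^[2] = g ∘ g := by
  funext y; rfl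

-- ---- nloop correctness ----
theorem nloop_eq : ∀ (n : Nat) (g : Nat → Nat) (cols : List Nat) (s : Nat),
    (∀ x, napply cols x = g (x % 16777216)) →
    (∀ x, x < 16777216 → g x < 16777216) → s < 16777216 →
    nloop cols s n = g^[n] s := by
  intro n
  induction n using Nat.strong_induction_on with
  | _ n ih =>
    intro g cols s hrep hpres hs
    rw [nloop]
    by_cases h0 : n = 0
    · simp [h0]
    · simp only [h0, dite_false]
      have hrep2 : ∀ x, napply (cols.map (napply cols)) x = (g ∘ g) (x % 16777216) := by
        intro x
        rw [napply_map (napply cols) (napply_zero cols) (napply_xor cols) cols x, hrep, hrep]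
        have hlt : g (x % 16777216) % 16777216 = g (x % 16777216) :=
          Nat.mod_eq_of_lt (hpres _ (Nat.mod_lt _ (by norm_num)))
        rw [hlt]
        rfl
      have hpres2 : ∀ x, x < 16777216 → (g ∘ g) x < 16777216 := by
        intro x hx; exact hpres _ (hpres _ hx)
      have hs' : (if n % 2 = 1 then napply cols s else s) < 16777216 := by
        split
        · rw [hrep, Nat.mod_eq_of_lt hs]; exact hpres _ hs
        · exact hs
      rw [ih (n / 2) (by omega) (g ∘ g) _ _ hrep2 hpres2 hs']
      have hsplit : g^[n] s = (g ∘ g)^[n / 2] (g^[n % 2] s) := by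
        conv_lhs => rw [show n = 2 * (n / 2) + n % 2 by omega]
        rw [Function.iterate_add_apply, Function.iterate_mul, pvIterTwo]
      rw [hsplit]
      congr 1
      rcases Nat.mod_two_eq_zero_or_one n with h | h <;>
        simp [h, hrep, Nat.mod_eq_of_lt hs]

-- ---- Int ↔ Nat bridges ----
theorem pvApply_cast (cs : List Nat) : ∀ (y x : Nat),
    (cs.map (Int.ofNat)).foldl
      (fun (st : Int × Int) c =>
        (if PySem.Int.band st.2 1 = 1 then PySem.Int.bxor st.1 c else st.1, st.2 >>> (1 : Nat)))
      ((y : Int), (x : Int))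
    = (((y ^^^ napply cs x : Nat) : Int), ((x >>> cs.length : Nat) : Int)) := by
  induction cs with
  | nil => intro y x; simp [napply]
  | cons c cs ih =>
    intro y x
    simp only [List.map_cons, List.foldl_cons, List.length_cons]
    have hband : PySem.Int.band ((x : Nat) : Int) 1 = ((x % 2 : Nat) : Int) := by
      rw [PySem.Int.band_one]
      exact_mod_cast PySem.Int.mod_natCast x 2
    have hcond : (((x % 2 : Nat) : Int) = 1) ↔ x % 2 = 1 := by
      constructor
      · intro hc; exact_mod_cast hc
      · intro hc; rw [hc]; rfl
    have hfst : (if PySem.Int.band ((x : Nat) : Int) 1 = 1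
          then PySem.Int.bxor ((y : Nat) : Int) (Int.ofNat c) else ((y : Nat) : Int))
        = (((if x % 2 = 1 then y ^^^ c else y : Nat) : Int)) := by
      rw [hband]
      by_cases h : x % 2 = 1
      · rw [if_pos (hcond.mpr h), if_pos h]
        simp [Int.ofNat_eq_natCast]
      · rw [if_neg (fun hc => h (hcond.mp hc)), if_neg h]
    have hsnd : ((x : Nat) : Int) >>> (1 : Nat) = (((x / 2 : Nat) : Int)) := by
      have h1 : ((x : Int) >>> (1 : Nat)) = ((x >>> 1 : Nat) : Int) := by simp
      rw [h1, Nat.shiftRight_one]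
    rw [hfst, hsnd, ih, Prod.mk.injEq]
    constructor
    · congr 1
      by_cases h : x % 2 = 1 <;> simp [napply, h, Nat.xor_assoc]
    · congr 1
      rw [Nat.shiftRight_succ_inside]

theorem pvApply_natCast (cs : List Nat) (x : Nat) :
    pvApply (cs.map (Int.ofNat)) (x : Int) = ((napply cs x : Nat) : Int) := by
  unfold pvApply
  rw [show (0 : Int) = ((0 : Nat) : Int) from rfl, pvApply_cast cs 0 x]
  simp

theorem pvMatmul_natCast (a b : List Nat) :
    pvMatmul (a.map Int.ofNat) (b.map Int.ofNat) = (b.map (napply a)).map Int.ofNat := by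
  unfold pvMatmul
  rw [List.map_map, List.map_map]
  apply List.map_congr_left
  intro c _
  exact pvApply_natCast a c

theorem pvLoop_natCast : ∀ (n : Nat) (cols : List Nat) (s : Nat),
    pvLoop (cols.map Int.ofNat) (s : Int) n = ((nloop cols s n : Nat) : Int) := by
  intro n
  induction n using Nat.strong_induction_on with
  | _ n ih =>
    intro cols s
    rw [pvLoop, nloop]
    by_cases h0 : n = 0
    · simp [h0]
    · simp only [h0, dite_false]
      rw [pvMatmul_natCast]
      have harg : (if n % 2 = 1 then pvApply (cols.map Int.ofNat) ((s : Nat) : Int) else ((s : Nat) : Int))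
          = (((if n % 2 = 1 then napply cols s else s : Nat) : Int)) := by
        by_cases h : n % 2 = 1 <;> simp [h, pvApply_natCast]
      rw [harg, ih (n / 2) (by omega)]

-- casting the three rounds of the step
theorem pvRound1_cast (x : Nat) :
    PySem.Int.mod (PySem.Int.bxor (x : Int) ((x : Int) * 64)) 16777216 = ((nr1 x : Nat) : Int) := by
  have h64 : ((x : Int) * 64) = ((x * 64 : Nat) : Int) := by push_cast; ring
  rw [h64, PySem.Int.bxor_natCast]
  exact_mod_cast PySem.Int.mod_natCast (x ^^^ x * 64) 16777216

theorem pvRound2_cast (x : Nat) :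
    PySem.Int.mod (PySem.Int.bxor (x : Int) (PySem.Int.floordiv (x : Int) 32)) 16777216
      = ((nr2 x : Nat) : Int) := by
  have hdiv : PySem.Int.floordiv (x : Int) 32 = ((x / 32 : Nat) : Int) := by
    exact_mod_cast PySem.Int.floordiv_natCast x 32
  rw [hdiv, PySem.Int.bxor_natCast]
  exact_mod_cast PySem.Int.mod_natCast (x ^^^ x / 32) 16777216

theorem pvRound3_cast (x : Nat) :
    PySem.Int.mod (PySem.Int.bxor (x : Int) ((x : Int) * 2048)) 16777216 = ((nr3 x : Nat) : Int) := by
  have h2048 : ((x : Int) * 2048) = ((x * 2048 : Nat) : Int) := by push_cast; ring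
  rw [h2048, PySem.Int.bxor_natCast]
  exact_mod_cast PySem.Int.mod_natCast (x ^^^ x * 2048) 16777216

theorem pvStepB_natCast (x : Nat) : pvStepB (x : Int) = ((nstep x : Nat) : Int) := by
  show PySem.Int.mod (PySem.Int.bxor
      (PySem.Int.mod (PySem.Int.bxor
        (PySem.Int.mod (PySem.Int.bxor (x : Int) ((x : Int) * 64)) 16777216)
        (PySem.Int.floordiv
          (PySem.Int.mod (PySem.Int.bxor (x : Int) ((x : Int) * 64)) 16777216) 32)) 16777216)
      ((PySem.Int.mod (PySem.Int.bxor
        (PySem.Int.mod (PySem.Int.bxor (x : Int) ((x : Int) * 64)) 16777216)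
        (PySem.Int.floordiv
          (PySem.Int.mod (PySem.Int.bxor (x : Int) ((x : Int) * 64)) 16777216) 32)) 16777216) * 2048))
      16777216
    = ((nstep x : Nat) : Int)
  rw [pvRound1_cast x, pvRound2_cast (nr1 x), pvRound3_cast (nr2 (nr1 x))]
  rfl

theorem pvBodyA_eq (x : Int) : pvBodyA x = pvStepB x := rfl

theorem pvStepB_bounds (x : Int) : 0 ≤ pvStepB x ∧ pvStepB x < 16777216 := by
  unfold pvStepB
  exact ⟨PySem.Int.mod_nonneg _ (by norm_num), PySem.Int.mod_lt _ (by norm_num)⟩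

theorem pvIter_natCast (f : Int → Int) (g : Nat → Nat)
    (h : ∀ x : Nat, f (x : Int) = ((g x : Nat) : Int)) :
    ∀ (m : Nat) (x : Nat), f^[m] (x : Int) = ((g^[m] x : Nat) : Int) := by
  intro m
  induction m with
  | zero => intro x; rfl
  | succ m ih =>
    intro x
    rw [Function.iterate_succ_apply, Function.iterate_succ_apply, h, ih]

theorem pvFoldl_const (f : Int → Int) : ∀ (l : List Int) (s : Int),
    l.foldl (fun a _ => f a) s = f^[l.length] s := by
  intro l
  induction l with
  | nil => intro s; rfl
  | cons c cs ih =>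
    intro s
    rw [List.foldl_cons, ih, List.length_cons, Function.iterate_succ_apply]

theorem pvRange_nil (count : Int) (h : count ≤ 0) : PySem.List.pyRange 0 count 1 = [] := by
  simp [PySem.List.pyRange]; omega

theorem pvRange_len (count : Int) : (PySem.List.pyRange 0 count 1).length = count.toNat := by
  simp [PySem.List.pyRange]; omega

theorem pvCols_eq : pvCols = ((npow2 24 1).map nstep).map Int.ofNat := by decide

-- ===== VERDICT (by name: the statement is the Claim_ definition above) =====
theorem fwd_secret_spec : Claim_equal_fwd_secret := by
  intro secret count _
  unfold Spec_fwd_secret fwd_secret fwd_secret_alt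
  by_cases hc : count ≤ 0
  · rw [pvRange_nil count hc, if_pos hc]
    rfl
  · rw [if_neg hc, pvFoldl_const pvBodyA, pvRange_len]
    have hbody : pvBodyA = pvStepB := funext pvBodyA_eq
    rw [hbody, show count.toNat = (count - 1).toNat + 1 by omega, Function.iterate_succ_apply]
    obtain ⟨hnn, hlt⟩ := pvStepB_bounds secret
    obtain ⟨s1n, hs1n⟩ : ∃ m : Nat, pvStepB secret = (m : Int) :=
      ⟨(pvStepB secret).toNat, (Int.toNat_of_nonneg hnn).symm⟩
    have hs1lt : s1n < 16777216 := by omega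
    rw [hs1n, pvIter_natCast pvStepB nstep pvStepB_natCast ((count - 1).toNat) s1n,
      pvCols_eq, pvLoop_natCast ((count - 1).toNat) _ s1n,
      nloop_eq ((count - 1).toNat) nstep _ s1n pvColsRepr (fun x _ => nstep_lt x) hs1lt]
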